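-- pv_equiv track=rewrite | github.com/Jhanvip20/LeetCode_Solutions | 1529-max-difference-you-can-get-from-changing-an-integer/1529-max-difference-you-can-get-from-changing-an-integer.py | create_low
-- ===== SOURCE A (Python) =====
-- def create_low(num, st):
--     low = 0
--     mp1 = -1
--     is_first_one = 0
--     while st > 0:
--         dig = num // st
--         if is_first_one == 0:
--             if dig == 1:
--                 is_first_one = 1
--             else:
--                 is_first_one = -1
--         if dig != 1 and mp1 == -1 and dig != 0:
--             mp1 = dig
--         if dig == mp1:
--             low = low * 10 + (0 if is_first_one == 1 else 1)
--         else: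
--             low = low * 10 + dig
--         num %= st
--         st //= 10
--     return low
-- ===== SOURCE B (Python) =====
-- def create_low(num, st):
--     # Pass 1: extract the raw digit stream (num//st may exceed 9 for non-power-of-ten st).
--     digits = []
--     while st > 0:
--         digits.append(num // st)
--         num %= st
--         st //= 10
--     if not digits:
--         return 0
--     # Pass 2: the replacement value depends only on the leading digit.
--     replacement = 0 if digits[0] == 1 else 1
--     # Pass 3: the replaced digit is the first one that is neither 1 nor 0.
--     target = -1
--     for d in digits:
--         if d != 1 and d != 0:
--             target = d
--             break
--     # Pass 4: rebuild the number, replacing every occurrence of target.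
--     low = 0
--     for d in digits:
--         low = low * 10 + (replacement if d == target else d)
--     return low
-- ===== Notes on version B (the rewrite author's own statement) =====
-- stated objective: simpler
-- what changed: A's single online state machine (is_first_one/mp1 updated while building the result) is replaced by four separate plain passes: extract the digit list, read the replacement value off the leading digit, find the target digit, rebuild the number.
-- outside the precondition, e.g. on create_low(-8, 10): A returns 11, B returns 12
import Mathlib
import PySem

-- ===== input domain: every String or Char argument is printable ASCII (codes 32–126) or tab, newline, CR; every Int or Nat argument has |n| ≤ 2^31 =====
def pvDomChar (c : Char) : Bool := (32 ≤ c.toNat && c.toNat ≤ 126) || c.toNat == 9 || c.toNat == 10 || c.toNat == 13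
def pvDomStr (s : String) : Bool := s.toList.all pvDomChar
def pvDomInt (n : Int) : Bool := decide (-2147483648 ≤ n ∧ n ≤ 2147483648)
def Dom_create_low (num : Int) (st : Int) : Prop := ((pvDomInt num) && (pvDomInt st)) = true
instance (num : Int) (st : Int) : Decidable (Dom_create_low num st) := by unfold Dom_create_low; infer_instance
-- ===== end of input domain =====

-- B replaces A's online state machine by four separate passes (digits / replacement / target / rebuild); not faster, simpler.

-- ===== PORT A =====
-- A's while-loop, with its state (low, mp1, is_first_one) carried through the recursion.
def create_lowGo (num st low mp1 ifo : Int) : Int :=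
  if h : 0 < st then
    let dig := PySem.Int.floordiv num st
    let ifo' := if ifo = 0 then (if dig = 1 then 1 else -1) else ifo
    let mp1' := if dig ≠ 1 ∧ mp1 = -1 ∧ dig ≠ 0 then dig else mp1
    let low' := if dig = mp1' then low * 10 + (if ifo' = 1 then 0 else 1) else low * 10 + dig
    create_lowGo (PySem.Int.mod num st) (PySem.Int.floordiv st 10) low' mp1' ifo'
  else low
termination_by st.toNat
decreasing_by
  rw [PySem.Int.floordiv_eq_ediv_of_pos (a := st) (by norm_num)]; omega

def create_low (num : Int) (st : Int) : Int :=
  create_lowGo num st 0 (-1) 0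

-- ===== PORT B =====
-- Pass 1 of Source B: the raw digit stream.
def altDigits (num st : Int) : List Int :=
  if h : 0 < st then
    PySem.Int.floordiv num st :: altDigits (PySem.Int.mod num st) (PySem.Int.floordiv st 10)
  else []
termination_by st.toNat
decreasing_by
  rw [PySem.Int.floordiv_eq_ediv_of_pos (a := st) (by norm_num)]; omega

-- Pass 3 of Source B: first digit that is neither 1 nor 0 (the broken-out for loop).
def altTarget : List Int → Int
  | [] => -1
  | d :: ds => if d ≠ 1 ∧ d ≠ 0 then d else altTarget ds

def create_low_alt (num : Int) (st : Int) : Int :=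
  match h : altDigits num st with
  | [] => 0
  | d0 :: _ =>
    let digits := altDigits num st
    let replacement : Int := if d0 = 1 then 0 else 1
    let target := altTarget digits
    digits.foldl (fun low d => low * 10 + (if d = target then replacement else d)) 0

-- ===== PRECONDITION & SPEC =====
-- Pre_ excludes negative num, on which A still returns: digit extraction is meaningful only for
-- nonnegative num — on negative num the leading 'digit' num//st is negative and A's unset-sentinel
-- mp1 = -1 can collide with a digit equal to -1, so neither program's value there is one anyone
-- would specify (a defensible-corner artefact; e.g. A(-8,10)=11, B(-8,10)=12).
def Pre_create_low (num : Int) (st : Int) : Prop := 0 ≤ num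
instance (num : Int) (st : Int) : Decidable (Pre_create_low num st) := by
  unfold Pre_create_low; infer_instance

def pvWitness_create_low : Int × Int := (21, 10)

def Spec_create_low (num : Int) (st : Int) (out : Int) : Prop := out = create_low_alt num st
instance (num : Int) (st : Int) (out : Int) : Decidable (Spec_create_low num st out) := by
  unfold Spec_create_low; infer_instance

-- ===== CLAIM (what is proved, stated in full; the proofs are below) =====
def Claim_equal_create_low : Prop :=
  ∀ (num : Int) (st : Int), Dom_create_low num st → Pre_create_low num st →
    Spec_create_low num st (create_low num st)

-- ===== LEMMAS AND PROOFS =====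

-- A's loop replayed over the already-extracted digit list.
def runA : List Int → Int → Int → Int → Int
  | [], low, _, _ => low
  | d :: ds, low, mp1, ifo =>
    let ifo' := if ifo = 0 then (if d = 1 then 1 else -1) else ifo
    let mp1' := if d ≠ 1 ∧ mp1 = -1 ∧ d ≠ 0 then d else mp1
    let low' := if d = mp1' then low * 10 + (if ifo' = 1 then 0 else 1) else low * 10 + d
    runA ds low' mp1' ifo'

theorem go_eq_runA (num st low mp1 ifo : Int) :
    create_lowGo num st low mp1 ifo = runA (altDigits num st) low mp1 ifo := by
  induction num, st using altDigits.induct generalizing low mp1 ifo with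
  | case1 num st h ih =>
    rw [create_lowGo, altDigits, dif_pos h, dif_pos h]
    rw [ih]; rfl
  | case2 num st h =>
    rw [create_lowGo, altDigits, dif_neg h, dif_neg h]; rfl

theorem altDigits_nonneg (num st : Int) (hn : 0 ≤ num) :
    ∀ d ∈ altDigits num st, 0 ≤ d := by
  induction num, st using altDigits.induct with
  | case1 num st h ih =>
    rw [altDigits, dif_pos h]
    intro d hd
    rcases List.mem_cons.mp hd with rfl | hd'
    · rw [PySem.Int.floordiv_eq_ediv_of_pos h]
      exact Int.ediv_nonneg hn (le_of_lt h)
    · exact ih (PySem.Int.mod_nonneg _ h) d hd'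
  | case2 num st h =>
    rw [altDigits, dif_neg h]; intro d hd; cases hd

theorem altTarget_ne01 (ds : List Int) : altTarget ds ≠ 0 ∧ altTarget ds ≠ 1 := by
  induction ds with
  | nil => simp [altTarget]
  | cons d ds ih =>
    by_cases hd : d ≠ 1 ∧ d ≠ 0
    · simp only [altTarget, if_pos hd]; omega
    · simpa [altTarget, hd] using ih

theorem runA_fixed (ds : List Int) (low m ifo : Int) (hm : m ≠ -1) (hi : ifo ≠ 0) :
    runA ds low m ifo =
      ds.foldl (fun l d => l * 10 + (if d = m then (if ifo = 1 then 0 else 1) else d)) low := by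
  induction ds generalizing low with
  | nil => rfl
  | cons d ds ih =>
    have h1 : ¬ (d ≠ 1 ∧ m = -1 ∧ d ≠ 0) := by tauto
    show runA ds _ _ _ = _
    rw [if_neg h1, if_neg hi, ih, List.foldl_cons]
    congr 1
    split_ifs <;> rfl

theorem runA_search (ds : List Int) (low ifo : Int) (hi : ifo ≠ 0)
    (hnn : ∀ d ∈ ds, 0 ≤ d) :
    runA ds low (-1) ifo =
      ds.foldl (fun l d => l * 10 + (if d = altTarget ds then (if ifo = 1 then 0 else 1) else d)) low := by
  induction ds generalizing low with
  | nil => rfl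
  | cons d ds ih =>
    have hd0 : 0 ≤ d := hnn d (List.mem_cons_self ..)
    have hnn' : ∀ x ∈ ds, 0 ≤ x := fun x hx => hnn x (List.mem_cons_of_mem _ hx)
    by_cases hd : d ≠ 1 ∧ d ≠ 0
    · have hd2 : 2 ≤ d := by omega
      have hdm1 : d ≠ -1 := by omega
      have hcond : d ≠ 1 ∧ (-1 : Int) = -1 ∧ d ≠ 0 := ⟨hd.1, rfl, hd.2⟩
      show runA ds _ _ _ = _
      rw [if_pos hcond, if_neg hi, if_pos rfl, runA_fixed ds _ d ifo hdm1 hi]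
      rw [List.foldl_cons]
      simp only [altTarget, if_pos hd]
      simp
    · have hd01 : d = 0 ∨ d = 1 := by omega
      have hcond : ¬ (d ≠ 1 ∧ (-1 : Int) = -1 ∧ d ≠ 0) := by tauto
      have hne : d ≠ (-1 : Int) := by omega
      have ht := altTarget_ne01 ds
      have hdt : d ≠ altTarget ds := by omega
      show runA ds _ _ _ = _
      rw [if_neg hcond, if_neg hi, if_neg hne, ih _ hnn', List.foldl_cons]
      simp only [altTarget, if_neg hd, if_neg hdt]

-- ===== VERDICT (by name: the statement is the Claim_ definition above) =====
theorem create_low_spec : Claim_equal_create_low := by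
  intro num st _ hPre
  show create_low num st = create_low_alt num st
  rw [create_low, go_eq_runA]
  by_cases hst : 0 < st
  case neg =>
    have hnil : altDigits num st = [] := by rw [altDigits, dif_neg hst]
    rw [create_low_alt, hnil]; rfl
  case pos =>
  have hds' : altDigits num st =
      PySem.Int.floordiv num st :: altDigits (PySem.Int.mod num st) (PySem.Int.floordiv st 10) := by
    rw [altDigits, dif_pos hst]
  have hdnn : (0:Int) ≤ PySem.Int.floordiv num st := by
    rw [PySem.Int.floordiv_eq_ediv_of_pos hst]
    exact Int.ediv_nonneg hPre (le_of_lt hst)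
  generalize hd_def : PySem.Int.floordiv num st = d at hds' hdnn
  generalize hds_def : altDigits (PySem.Int.mod num st) (PySem.Int.floordiv st 10) = ds at hds'
  have hnn : ∀ x ∈ ds, 0 ≤ x := by
    rw [← hds_def]
    exact altDigits_nonneg _ _ (PySem.Int.mod_nonneg _ hst)
  have hB : create_low_alt num st =
      (d :: ds).foldl
        (fun low x => low * 10 + (if x = altTarget (d :: ds) then (if d = 1 then (0:Int) else 1) else x)) 0 := by
    rw [create_low_alt, hds']
  rw [hB, hds', List.foldl_cons]
  -- first iteration of A's loop: ifo = 0, mp1 = -1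
  show runA ds _ _ _ = _
  by_cases h1 : d = 1
  · -- leading digit 1: replacement 0, mp1 stays -1
    have hcond : ¬ (d ≠ 1 ∧ (-1 : Int) = -1 ∧ d ≠ 0) := by tauto
    have hne : d ≠ (-1 : Int) := by omega
    have ht := altTarget_ne01 ds
    have htgt : altTarget (d :: ds) = altTarget ds := by
      simp only [altTarget, if_neg (show ¬ (d ≠ 1 ∧ d ≠ 0) by tauto)]
    have hdt : d ≠ altTarget (d :: ds) := by rw [htgt]; omega
    rw [if_pos rfl, if_pos h1, if_neg hcond, if_neg hne, if_neg hdt,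
      runA_search ds _ 1 (by norm_num) hnn, htgt]
    simp only [if_pos h1]
    simp
  · by_cases h0 : d = 0
    · -- leading digit 0: replacement 1, mp1 stays -1
      have hcond : ¬ (d ≠ 1 ∧ (-1 : Int) = -1 ∧ d ≠ 0) := by tauto
      have hne : d ≠ (-1 : Int) := by omega
      have ht := altTarget_ne01 ds
      have htgt : altTarget (d :: ds) = altTarget ds := by
        simp only [altTarget, if_neg (show ¬ (d ≠ 1 ∧ d ≠ 0) by tauto)]
      have hdt : d ≠ altTarget (d :: ds) := by rw [htgt]; omega
      rw [if_pos rfl, if_neg h1, if_neg hcond, if_neg hne, if_neg hdt,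
        runA_search ds _ (-1) (by norm_num) hnn, htgt]
      simp only [if_neg h1]
      norm_num
    · -- leading digit outside {0,1}: it is the target and gets replaced
      have hd2 : 2 ≤ d := by omega
      have hcond : d ≠ 1 ∧ (-1 : Int) = -1 ∧ d ≠ 0 := ⟨h1, rfl, h0⟩
      have htgt : altTarget (d :: ds) = d := by
        simp only [altTarget, if_pos (show d ≠ 1 ∧ d ≠ 0 from ⟨h1, h0⟩)]
      rw [if_pos rfl, if_neg h1, if_pos hcond, if_pos rfl, htgt, if_pos rfl]
      rw [runA_fixed ds _ d _ (by omega) (by simp [h1])]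
      norm_num [h1]
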